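-- pv_equiv track=rewrite | github.com/ali1hammoud/GeneticAlgorithm-GraphColoringProblem | GA_test.py | fitness_calculation
-- ===== SOURCE A (Python) =====
-- def fitness_calculation(individual, adjacency_matrix):
--     fitness_fault = 0
--     for i in range(len(individual)-1):
--         for j in range(len(individual)):
--             if individual[i] == individual[j] and adjacency_matrix[j][i] == 1:
--                 fitness_fault += 1
--     fitness_value =  fitness_fault
--     return fitness_value
-- ===== SOURCE B (Python) =====
-- def fitness_calculation(individual, adjacency_matrix):
--     groups = {}
--     for j, color in enumerate(individual):
--         groups.setdefault(color, []).append(j)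
--     total = 0
--     for i in range(len(individual) - 1):
--         for j in groups[individual[i]]:
--             if adjacency_matrix[j][i] == 1:
--                 total += 1
--     return total
-- ===== Notes on version B (the rewrite author's own statement) =====
-- stated objective: alternative
-- what changed: B builds a dict mapping each color to the list of vertex indices holding it, so the per-i inner scan over all n vertices with a color-equality test disappears: the inner loop runs only over the same-color group.
import Mathlib
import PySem

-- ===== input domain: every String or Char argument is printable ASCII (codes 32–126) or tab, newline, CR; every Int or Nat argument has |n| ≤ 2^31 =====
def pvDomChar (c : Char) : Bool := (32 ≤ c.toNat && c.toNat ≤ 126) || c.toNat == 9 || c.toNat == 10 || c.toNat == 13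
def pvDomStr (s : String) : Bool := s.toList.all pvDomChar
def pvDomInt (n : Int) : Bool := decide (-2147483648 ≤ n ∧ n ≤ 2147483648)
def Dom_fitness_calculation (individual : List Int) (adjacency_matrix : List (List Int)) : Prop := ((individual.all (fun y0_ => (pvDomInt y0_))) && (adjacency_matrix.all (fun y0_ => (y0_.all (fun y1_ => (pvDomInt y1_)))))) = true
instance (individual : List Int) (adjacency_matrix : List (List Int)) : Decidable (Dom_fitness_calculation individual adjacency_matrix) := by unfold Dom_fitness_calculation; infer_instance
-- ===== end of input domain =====

-- B indexes vertices by color in a dict (one pass), so the inner scan over all vertices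
-- with a color-equality test disappears; objective: alternative decomposition, same count.

-- ===== PORT A =====
def fitness_calculation (individual : List Int) (adjacency_matrix : List (List Int)) : Int :=
  (PySem.List.pyRange 0 ((individual.length : Int) - 1)).foldl (fun fitness_fault i =>
    (PySem.List.pyRange 0 (individual.length : Int)).foldl (fun fitness_fault j =>
      if (PySem.List.pyGetD individual i 0 == PySem.List.pyGetD individual j 0) &&
         (PySem.List.pyGetD (PySem.List.pyGetD adjacency_matrix j []) i 0 == 1)
      then fitness_fault + 1 else fitness_fault) fitness_fault) 0

-- ===== PORT B =====
-- 'groups.setdefault(color, []).append(j)' is the dict update d[color] = d.get(color, []) + [j],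
-- i.e. PySem.Dict.modify; 'groups[individual[i]]' always hits (every color was inserted), so getD is exact.
def fitness_calculation_alt (individual : List Int) (adjacency_matrix : List (List Int)) : Int :=
  let groups : PySem.Dict Int (List Int) :=
    (PySem.List.enumerate individual 0).foldl
      (fun d p => d.modify p.2 [] (· ++ [p.1])) PySem.Dict.empty
  (PySem.List.pyRange 0 ((individual.length : Int) - 1)).foldl (fun total i =>
    (groups.getD (PySem.List.pyGetD individual i 0) []).foldl (fun total j =>
      if PySem.List.pyGetD (PySem.List.pyGetD adjacency_matrix j []) i 0 == 1
      then total + 1 else total) total) 0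

-- ===== PRECONDITION & SPEC =====
-- Exactly the inputs on which the Python A returns: every adjacency entry [j][i] the scan
-- actually reads (same-colored pair i < n-1, j < n) must exist, else A raises IndexError.
def Pre_fitness_calculation (individual : List Int) (adjacency_matrix : List (List Int)) : Prop :=
  ∀ i ∈ List.range (individual.length - 1), ∀ j ∈ List.range individual.length,
    individual.getD i 0 = individual.getD j 0 →
      j < adjacency_matrix.length ∧ i < (adjacency_matrix.getD j []).length
instance (individual : List Int) (adjacency_matrix : List (List Int)) : Decidable (Pre_fitness_calculation individual adjacency_matrix) := by unfold Pre_fitness_calculation; infer_instance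

def pvWitness_fitness_calculation : List Int × List (List Int) := ([0, 1], [[1, 0], [0, 1]])

def Spec_fitness_calculation (individual : List Int) (adjacency_matrix : List (List Int)) (out : Int) : Prop := out = fitness_calculation_alt individual adjacency_matrix
instance (individual : List Int) (adjacency_matrix : List (List Int)) (out : Int) : Decidable (Spec_fitness_calculation individual adjacency_matrix out) := by unfold Spec_fitness_calculation; infer_instance

-- ===== CLAIM =====
def Claim_equal_fitness_calculation : Prop := ∀ (individual : List Int) (adjacency_matrix : List (List Int)), Dom_fitness_calculation individual adjacency_matrix → Pre_fitness_calculation individual adjacency_matrix → Spec_fitness_calculation individual adjacency_matrix (fitness_calculation individual adjacency_matrix)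

-- ===== LEMMAS AND PROOFS =====

-- A's pair predicate: same color and an edge from j into column i
def pA (ind : List Int) (adj : List (List Int)) (i j : Int) : Bool :=
  (PySem.List.pyGetD ind i 0 == PySem.List.pyGetD ind j 0) &&
  (PySem.List.pyGetD (PySem.List.pyGetD adj j []) i 0 == 1)

-- B's dict value at color c is exactly the ordered list of indices holding color c
lemma groups_getD (ind : List Int) (c : Int) :
    (((PySem.List.enumerate ind 0).foldl
        (fun d p => d.modify p.2 [] (· ++ [p.1])) PySem.Dict.empty).getD c []) =
      (PySem.List.pyRange 0 (ind.length : Int)).filter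
        (fun j => PySem.List.pyGetD ind j 0 == c) := by
  have hswap : (PySem.List.enumerate ind 0).foldl
        (fun d p => d.modify p.2 [] (· ++ [p.1])) (PySem.Dict.empty : PySem.Dict Int (List Int)) =
      ((PySem.List.enumerate ind 0).map Prod.swap).foldl
        (fun d p => d.modify p.1 [] (· ++ [p.2])) PySem.Dict.empty := by
    rw [List.foldl_map]
    rfl
  rw [hswap, PySem.Dict.getD_foldl_modify_append, PySem.Dict.getD_empty, List.nil_append,
    PySem.List.enumerate_eq_map_pyRange ind 0]
  simp [List.filter_map, List.map_map, Function.comp_def]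

-- A's inner count over all vertices equals B's inner count over the color group of i
lemma inner_eq (ind : List Int) (adj : List (List Int)) (i : Int) :
    List.countP (fun j => PySem.List.pyGetD (PySem.List.pyGetD adj j []) i 0 == 1)
      ((PySem.List.pyRange 0 (ind.length : Int)).filter
        (fun j => PySem.List.pyGetD ind j 0 == PySem.List.pyGetD ind i 0)) =
    List.countP (pA ind adj i) (PySem.List.pyRange 0 (ind.length : Int)) := by
  rw [List.countP_filter]
  apply List.countP_congr
  intro j _
  unfold pA
  rw [Bool.and_comm, Bool.beq_comm]

theorem ports_eq (ind : List Int) (adj : List (List Int)) :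
    fitness_calculation ind adj = fitness_calculation_alt ind adj := by
  unfold fitness_calculation fitness_calculation_alt
  simp only [groups_getD]
  apply PySem.List.foldl_congr_mem
  intro acc i _
  rw [PySem.List.foldl_count_if, PySem.List.foldl_count_if, inner_eq]
  rfl

-- ===== VERDICT =====
theorem fitness_calculation_spec : Claim_equal_fitness_calculation := by
  intro ind adj _ _
  exact ports_eq ind adj
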